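-- pv_equiv track=rewrite | github.com/MrBrantCode/unitest_baseline | mut_generate/mist_train_taco/taco_13988/solution.py | count_zero_binomial_coefficients
-- ===== SOURCE A (Python) =====
-- def count_zero_binomial_coefficients(n, p):
--     a = []
--     nn = n
--     while nn > 0:
--         a.append(nn % p)
--         nn //= p
--     m = 0
--     for i in range(len(a)):
--         b = a[-(i + 1)]
--         m *= b + 1
--         m += b
--     return n - m
-- ===== SOURCE B (Python) =====
-- def count_zero_binomial_coefficients(n, p):
--     prod = 1
--     nn = n
--     while nn > 0:
--         prod *= nn % p + 1
--         nn //= p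
--     return n + 1 - prod
-- ===== Notes on version B (the rewrite author's own statement) =====
-- stated objective: simpler
-- what changed: B replaces A's two-phase structure (build the base-p digit list, then a most-significant-first Horner recurrence m = m*(b+1)+b over it) with a single pass that multiplies (digit+1) directly while peeling digits, returning n + 1 - prod; no intermediate list.
import Mathlib
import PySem

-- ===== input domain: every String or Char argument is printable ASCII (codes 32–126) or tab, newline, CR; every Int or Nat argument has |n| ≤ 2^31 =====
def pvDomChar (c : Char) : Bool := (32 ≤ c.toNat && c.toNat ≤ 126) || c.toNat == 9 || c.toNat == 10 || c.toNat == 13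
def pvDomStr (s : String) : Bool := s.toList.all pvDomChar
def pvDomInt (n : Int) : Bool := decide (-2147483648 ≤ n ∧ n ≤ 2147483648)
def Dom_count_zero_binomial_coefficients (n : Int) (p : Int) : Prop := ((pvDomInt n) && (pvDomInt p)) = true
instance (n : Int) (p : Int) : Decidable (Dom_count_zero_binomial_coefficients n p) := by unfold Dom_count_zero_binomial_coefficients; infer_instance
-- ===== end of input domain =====

-- B is a simpler one-pass decomposition: it multiplies (digit+1) while peeling base-p digits
-- and returns n + 1 - prod, dropping A's digit list and Horner loop. Equal return value on Pre_.

-- ===== PORT A =====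
-- the while loop of A, fueled (fuel n.toNat+1 suffices on Pre_: nn strictly decreases while positive)
def pvLoopA (p : Int) : Nat → Int → List Int → List Int
  | 0, _, a => a
  | fuel+1, nn, a =>
    if nn > 0 then pvLoopA p fuel (PySem.Int.floordiv nn p) (a ++ [PySem.Int.mod nn p]) else a

def count_zero_binomial_coefficients (n : Int) (p : Int) : Int :=
  let a := pvLoopA p (n.toNat + 1) n []
  -- for i in range(len(a)): b = a[-(i+1)]; m *= b+1; m += b   (index always in range: default 0 unused)
  let m := (List.range a.length).foldl
    (fun m (i : Nat) =>
      let b := PySem.List.pyGetD a (-((i : Int) + 1)) 0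
      m * (b + 1) + b) 0
  n - m

-- ===== PORT B =====
def pvLoopB (p : Int) : Nat → Int → Int → Int
  | 0, _, prod => prod
  | fuel+1, nn, prod =>
    if nn > 0 then pvLoopB p fuel (PySem.Int.floordiv nn p) (prod * (PySem.Int.mod nn p + 1)) else prod

def count_zero_binomial_coefficients_alt (n : Int) (p : Int) : Int :=
  n + 1 - pvLoopB p (n.toNat + 1) n 1

-- ===== PRECONDITION & SPEC =====
-- Pre_ excludes exactly the inputs where Python A returns no value: with n > 0, p = 0 raises
-- ZeroDivisionError and p = 1 loops forever (nn //= 1 never shrinks).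
def Pre_count_zero_binomial_coefficients (n : Int) (p : Int) : Prop := n ≤ 0 ∨ p < 0 ∨ 2 ≤ p
instance (n : Int) (p : Int) : Decidable (Pre_count_zero_binomial_coefficients n p) := by
  unfold Pre_count_zero_binomial_coefficients; infer_instance

def pvWitness_count_zero_binomial_coefficients : Int × Int := (10, 3)

def Spec_count_zero_binomial_coefficients (n : Int) (p : Int) (out : Int) : Prop := out = count_zero_binomial_coefficients_alt n p
instance (n : Int) (p : Int) (out : Int) : Decidable (Spec_count_zero_binomial_coefficients n p out) := by unfold Spec_count_zero_binomial_coefficients; infer_instance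

-- ===== CLAIM (what is proved, stated in full; the proofs are below) =====
def Claim_equal_count_zero_binomial_coefficients : Prop := ∀ (n : Int) (p : Int), Dom_count_zero_binomial_coefficients n p → Pre_count_zero_binomial_coefficients n p → Spec_count_zero_binomial_coefficients n p (count_zero_binomial_coefficients n p)

-- ===== LEMMAS AND PROOFS =====

-- A's loop: the accumulator is only appended to
theorem pvLoopA_acc (p : Int) (fuel : Nat) : ∀ (nn : Int) (a : List Int),
    pvLoopA p fuel nn a = a ++ pvLoopA p fuel nn [] := by
  induction fuel with
  | zero => intro nn a; simp [pvLoopA]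
  | succ k ih =>
    intro nn a
    simp only [pvLoopA]
    split
    · rw [ih (PySem.Int.floordiv nn p) (a ++ [PySem.Int.mod nn p]),
          ih (PySem.Int.floordiv nn p) ([] ++ [PySem.Int.mod nn p])]
      simp
    · simp

-- B's loop computes prod times the product of (digit + 1) over A's digit list, same fuel
theorem pvLoopB_eq (p : Int) (fuel : Nat) : ∀ (nn prod : Int),
    pvLoopB p fuel nn prod = prod * ((pvLoopA p fuel nn []).map (· + 1)).prod := by
  induction fuel with
  | zero => intro nn prod; simp [pvLoopA, pvLoopB]
  | succ k ih =>
    intro nn prod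
    simp only [pvLoopA, pvLoopB]
    split
    · rw [ih, pvLoopA_acc p k (PySem.Int.floordiv nn p) ([] ++ [PySem.Int.mod nn p])]
      simp only [List.nil_append, List.cons_append, List.map_append, List.map_cons, List.map_nil, List.prod_cons]
      ring
    · simp

-- folding over range(len l) with getD is folding over l
theorem foldl_range_getD {α β : Type} [Inhabited α] (f : β → α → β) :
    ∀ (l : List α) (b : β),
    (List.range l.length).foldl (fun m i => f m (l.getD i default)) b = l.foldl f b := by
  intro l
  induction l with
  | nil => intro b; simp
  | cons x xs ih =>
    intro b
    simp only [List.length_cons, List.range_succ_eq_map, List.foldl_cons, List.foldl_map]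
    simpa using ih (f b x)

-- two folds over range(n) agree when the step functions agree below n
theorem foldl_range_congr {β : Type} (f g : β → Nat → β) :
    ∀ (n : Nat) (b : β), (∀ i < n, ∀ m, f m i = g m i) →
    (List.range n).foldl f b = (List.range n).foldl g b := by
  intro n
  induction n with
  | zero => intro b _; simp
  | succ k ih =>
    intro b h
    rw [List.range_succ, List.foldl_append, List.foldl_append,
        ih b (fun i hi m => h i (by omega) m)]
    simp [h k (by omega)]

-- A's negative index a[-(i+1)] reads a.reverse[i]
theorem pyGetD_neg_rev (a : List Int) (i : Nat) (h : i < a.length) :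
    PySem.List.pyGetD a (-((i : Int) + 1)) 0 = a.reverse.getD i 0 := by
  have h1 : (-((i : Int) + 1)) = -(((i + 1 : Nat) : Int)) := by push_cast; ring
  rw [h1, PySem.List.pyGetD_neg_natCast a (i + 1) 0 (by omega) (by omega)]
  rw [List.getD_eq_getElem _ _ (by simpa using h), List.getElem_reverse]
  congr 1
  omega

-- Horner recurrence m = m*(b+1)+b equals (m+1) * ∏(b+1) - 1
theorem horner_prod : ∀ (l : List Int) (m : Int),
    l.foldl (fun m b => m * (b + 1) + b) m = (m + 1) * (l.map (· + 1)).prod - 1 := by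
  intro l
  induction l with
  | nil => intro m; simp
  | cons x xs ih =>
    intro m
    simp only [List.foldl_cons, List.map_cons, List.prod_cons, ih]
    ring

-- A's m-loop over the digit list equals ∏(digit+1) - 1
theorem mval_eq (a : List Int) :
    (List.range a.length).foldl
      (fun m (i : Nat) =>
        let b := PySem.List.pyGetD a (-((i : Int) + 1)) 0
        m * (b + 1) + b) 0
    = (a.map (· + 1)).prod - 1 := by
  have step := foldl_range_congr
    (fun m (i : Nat) =>
      let b := PySem.List.pyGetD a (-((i : Int) + 1)) 0
      m * (b + 1) + b)
    (fun m (i : Nat) => m * (a.reverse.getD i default + 1) + a.reverse.getD i default)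
    a.length 0
    (by
      intro i hi m
      simp only [pyGetD_neg_rev a i hi]
      rfl)
  rw [step]
  have hlen : a.length = a.reverse.length := by simp
  rw [hlen, foldl_range_getD (fun m b => m * (b + 1) + b) a.reverse, horner_prod]
  simp [List.map_reverse]

theorem ports_agree (n p : Int) :
    count_zero_binomial_coefficients n p = count_zero_binomial_coefficients_alt n p := by
  show n - _ = n + 1 - pvLoopB p (n.toNat + 1) n 1
  rw [mval_eq, pvLoopB_eq]
  ring

-- ===== VERDICT (by name: the statement is the Claim_ definition above) =====
theorem count_zero_binomial_coefficients_spec : Claim_equal_count_zero_binomial_coefficients := by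
  intro n p _ _
  unfold Spec_count_zero_binomial_coefficients
  exact ports_agree n p
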